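-- pv_equiv track=rewrite | github.com/ChrYsJH/qmt_weight_sync | core/trader.py | _split_order_volume
-- ===== SOURCE A (Python) =====
-- def _split_order_volume(volume: int, max_per_order: int = 100000) -> list:
--     """
--     将订单数量拆分为多笔（用于科创版限价单限制）
--
--     Args:
--         volume: 总数量
--         max_per_order: 每笔最大数量（默认10万股）
--
--     Returns:
--         list: 拆分后的订单数量列表
--
--     示例:
--         250000 -> [100000, 100000, 50000]
--         80000 -> [80000]
--     """
--     if volume <= max_per_order:
--         return [volume]
--
--     splits = []
--     remaining = volume
--
--     while remaining > 0:
--         if remaining > max_per_order: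
--             splits.append(max_per_order)
--             remaining -= max_per_order
--         else:
--             splits.append(remaining)
--             remaining = 0
--
--     return splits
-- ===== SOURCE B (Python) =====
-- def _split_order_volume(volume: int, max_per_order: int = 100000) -> list:
--     # Closed-form split: q full chunks plus the remainder (dropped when zero).
--     if volume <= max_per_order:
--         return [volume]
--     q, r = divmod(volume, max_per_order)
--     return [max_per_order] * q + ([r] if r else [])
-- ===== Notes on version B (the rewrite author's own statement) =====
-- stated objective: simpler
-- what changed: Replaces the iterative peel-off while loop with a closed-form divmod computation building the list directly.
-- outside the precondition, e.g. on _split_order_volume(-1, -3): A returns [], B returns [-1]; on _split_order_volume(5, 0): A does not finish within the time limit, B raises ZeroDivisionError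
import Mathlib
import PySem

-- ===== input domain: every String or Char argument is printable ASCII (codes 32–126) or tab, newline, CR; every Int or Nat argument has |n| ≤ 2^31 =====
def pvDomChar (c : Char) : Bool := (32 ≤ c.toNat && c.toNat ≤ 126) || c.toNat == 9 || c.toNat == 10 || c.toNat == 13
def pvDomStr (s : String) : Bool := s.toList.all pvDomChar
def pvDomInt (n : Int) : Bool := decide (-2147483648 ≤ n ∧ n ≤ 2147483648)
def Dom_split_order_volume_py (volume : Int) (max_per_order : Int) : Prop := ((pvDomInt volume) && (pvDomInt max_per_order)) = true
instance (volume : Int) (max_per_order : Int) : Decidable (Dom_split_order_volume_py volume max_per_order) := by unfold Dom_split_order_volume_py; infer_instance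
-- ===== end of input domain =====

-- B replaces A's iterative peel-off loop by a closed-form divmod construction (objective: simpler).


-- ===== PORT A =====
-- A's while loop; fuel only makes the recursion total (inside Pre_ the loop runs at
-- most volume.toNat times since each step subtracts max_per_order ≥ 1).
def splitLoopA (fuel : Nat) (remaining : Int) (max_per_order : Int) (splits : List Int) : List Int :=
  match fuel with
  | 0 => splits
  | f + 1 =>
    if remaining > 0 then
      if remaining > max_per_order then
        splitLoopA f (remaining - max_per_order) max_per_order (splits ++ [max_per_order])
      else
        splitLoopA f 0 max_per_order (splits ++ [remaining])
    else splits

def split_order_volume_py (volume : Int) (max_per_order : Int) : List Int :=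
  if volume ≤ max_per_order then [volume]
  else splitLoopA (volume.toNat + 1) volume max_per_order []

-- ===== PORT B =====
def split_order_volume_py_alt (volume : Int) (max_per_order : Int) : List Int :=
  if volume ≤ max_per_order then [volume]
  else
    let q := PySem.Int.floordiv volume max_per_order
    let r := PySem.Int.mod volume max_per_order
    List.replicate q.toNat max_per_order ++ (if r ≠ 0 then [r] else [])

-- ===== PRECONDITION & SPEC =====
-- Pre_ excludes max_per_order ≤ 0 with volume > max_per_order: there A loops forever for
-- positive volume, and for non-positive volume returns the accidental [] (the loop never runs).
def Pre_split_order_volume_py (volume : Int) (max_per_order : Int) : Prop :=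
  volume ≤ max_per_order ∨ 0 < max_per_order
instance (volume : Int) (max_per_order : Int) : Decidable (Pre_split_order_volume_py volume max_per_order) := by unfold Pre_split_order_volume_py; infer_instance
def pvWitness_split_order_volume_py : Int × Int := (250, 100)

def Spec_split_order_volume_py (volume : Int) (max_per_order : Int) (out : List Int) : Prop := out = split_order_volume_py_alt volume max_per_order
instance (volume : Int) (max_per_order : Int) (out : List Int) : Decidable (Spec_split_order_volume_py volume max_per_order out) := by unfold Spec_split_order_volume_py; infer_instance

-- ===== CLAIM (what is proved, stated in full; the proofs are below) =====
def Claim_equal_split_order_volume_py : Prop := ∀ (volume : Int) (max_per_order : Int), Dom_split_order_volume_py volume max_per_order → Pre_split_order_volume_py volume max_per_order → Spec_split_order_volume_py volume max_per_order (split_order_volume_py volume max_per_order)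

-- ===== LEMMAS AND PROOFS =====
lemma splitLoopA_closed (m : Int) (hm : 0 < m) :
    ∀ (fuel : Nat) (r : Int) (acc : List Int), 0 < r → r.toNat ≤ fuel →
    splitLoopA fuel r m acc =
      acc ++ (List.replicate (r / m).toNat m ++ (if r % m ≠ 0 then [r % m] else [])) := by
  intro fuel
  induction fuel with
  | zero => intro r acc hr hle; omega
  | succ f ih =>
    intro r acc hr hle
    rw [splitLoopA]
    simp only [hr, if_pos]
    by_cases h : r > m
    · rw [if_pos h, ih (r - m) (acc ++ [m]) (by omega) (by omega)]
      have hq : (r - m) / m = r / m - 1 := by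
        have := Int.add_mul_ediv_right r (-1) (by omega : m ≠ 0)
        have e : r + -1 * m = r - m := by ring
        rw [e] at this; omega
      have hmod : (r - m) % m = r % m := Int.sub_emod_right r m
      have hq1 : 1 ≤ r / m := by
        rw [Int.le_ediv_iff_mul_le hm]; omega
      have hrep : (r / m).toNat = ((r - m) / m).toNat + 1 := by omega
      rw [hq, hmod, hrep, List.replicate_succ]
      have : (r / m).toNat - 1 = ((r - m) / m).toNat := by omega
      simp [this]
    · rw [if_neg h]
      rw [splitLoopA.eq_def]
      simp only [lt_irrefl, ite_false, gt_iff_lt]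
      by_cases he : r = m
      · subst he
        rw [Int.ediv_self (by omega), Int.emod_self]
        simp only [ne_eq, not_true_eq_false, if_false, List.replicate_one]
        cases f <;> rfl
      · have hlt : r < m := by omega
        rw [Int.ediv_eq_zero_of_lt (by omega) hlt, Int.emod_eq_of_lt (by omega) hlt]
        have : r ≠ 0 := by omega
        simp only [Int.toNat_zero, List.replicate_zero, List.nil_append, this, ne_eq,
          not_false_eq_true, if_true]
        cases f <;> rfl

-- ===== VERDICT (by name: the statement is the Claim_ definition above) =====
theorem split_order_volume_py_spec : Claim_equal_split_order_volume_py := by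
  intro v m _ hpre
  unfold Spec_split_order_volume_py split_order_volume_py split_order_volume_py_alt
  by_cases h : v ≤ m
  · simp [h]
  · have hm : 0 < m := by rcases hpre with h' | h' <;> omega
    have hv : 0 < v := by omega
    rw [if_neg h, if_neg h,
      splitLoopA_closed m hm (v.toNat + 1) v [] hv (by omega)]
    rw [PySem.Int.floordiv_eq_ediv_of_pos hm, PySem.Int.mod_eq_emod_of_pos hm]
    simp
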